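-- pv_equiv track=rewrite | github.com/Square789/Demomgr | demomgr.py | formatbookmarkdata
-- ===== SOURCE A (Python) =====
-- def assignbookmarkdata(files, bookmarkdata):
-- 	"""Takes a list of files and the bookmarkdata; returns a list that contains the parallel bookmarkdata; ("", [], []) if no match found."""
-- 	assignedlogs = [("",[],[]) for i in range(len(files))]
-- 	for i in bookmarkdata:
-- 		for j in range(len(files)):
-- 			if i[0]==files[j]:
-- 				assignedlogs[j] = i
-- 	return assignedlogs
--
-- def formatbookmarkdata(filelist, bookmarkdata):
-- 	'''Converts bookmarkdata into a list of strings: "X Bookmarks, Y Killstreaks". needs filelist to assign bookmarkdata to '''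
--
-- 	assignedlogs = assignbookmarkdata(filelist, bookmarkdata)
--
-- 	listout = ["" for i in assignedlogs]
-- 	for i in range(len(assignedlogs)): #convert the correctly assigned logs ("", [], []) into information displaying strings
-- 		if assignedlogs[i] != ("",[],[]):
-- 			listout[i] = str(len(assignedlogs[i][2])) + " Bookmarks; " + str(len(assignedlogs[i][1])) + " Killstreaks."
-- 		else:
-- 			listout[i] = "None"
--
-- 	return listout
-- ===== SOURCE B (Python) =====
-- def _describe(entry):
--     if entry != ("", [], []):
--         return str(len(entry[2])) + " Bookmarks; " + str(len(entry[1])) + " Killstreaks."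
--     return "None"
--
-- def formatbookmarkdata(filelist, bookmarkdata):
--     # One dict built in entry order (later duplicates overwrite = A's last-wins),
--     # then a single pass over filelist; no parallel intermediate list.
--     d = {entry[0]: entry for entry in bookmarkdata}
--     return [_describe(d.get(f, ("", [], []))) for f in filelist]
-- ===== Notes on version B (the rewrite author's own statement) =====
-- stated objective: faster
-- what changed: Replaces the quadratic scan (for every bookmark entry rescan the whole filelist and the parallel intermediate list) by one dict keyed on entry[0] built in a single pass plus one direct pass over filelist.
import Mathlib
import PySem

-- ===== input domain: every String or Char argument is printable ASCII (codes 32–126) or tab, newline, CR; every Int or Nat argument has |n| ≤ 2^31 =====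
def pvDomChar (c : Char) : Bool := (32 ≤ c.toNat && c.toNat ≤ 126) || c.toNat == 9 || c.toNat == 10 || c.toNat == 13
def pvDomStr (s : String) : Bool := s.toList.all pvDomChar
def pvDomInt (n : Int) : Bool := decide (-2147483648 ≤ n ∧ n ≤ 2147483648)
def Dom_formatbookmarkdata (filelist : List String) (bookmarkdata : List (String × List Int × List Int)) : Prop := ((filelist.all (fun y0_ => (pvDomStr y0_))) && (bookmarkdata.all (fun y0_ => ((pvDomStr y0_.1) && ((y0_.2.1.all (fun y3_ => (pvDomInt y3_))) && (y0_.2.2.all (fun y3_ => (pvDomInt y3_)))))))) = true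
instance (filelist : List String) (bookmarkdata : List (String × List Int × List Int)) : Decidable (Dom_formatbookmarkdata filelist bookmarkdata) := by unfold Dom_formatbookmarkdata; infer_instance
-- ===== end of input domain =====

-- B replaces A's nested rescans with one dict keyed on entry name plus a single pass over filelist (asymptotically faster); same return values.

-- ===== PORT A =====
-- literal port of assignbookmarkdata: parallel sentinel list, nested scans, in-place set.
-- files[j] with j ∈ range(len files) is always in range, so getD j "" is exact there.
def assignbookmarkdata (files : List String) (bookmarkdata : List (String × List Int × List Int)) : List (String × List Int × List Int) :=
  let assignedlogs := (List.range files.length).map (fun _ => (("" : String), ([] : List Int), ([] : List Int)))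
  bookmarkdata.foldl (fun assignedlogs i =>
    (List.range files.length).foldl (fun assignedlogs j =>
      if i.1 == files.getD j "" then assignedlogs.set j i else assignedlogs) assignedlogs) assignedlogs

def formatbookmarkdata (filelist : List String) (bookmarkdata : List (String × List Int × List Int)) : List String :=
  let assignedlogs := assignbookmarkdata filelist bookmarkdata
  let listout := assignedlogs.map (fun _ => "")
  (List.range assignedlogs.length).foldl (fun listout i =>
    let e := assignedlogs.getD i ("", [], [])   -- i ∈ range(len assignedlogs): in range, getD exact
    if e ≠ ("", [], []) then
      listout.set i (PySem.Int.toStr (e.2.2.length : Int) ++ " Bookmarks; " ++ PySem.Int.toStr (e.2.1.length : Int) ++ " Killstreaks.")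
    else
      listout.set i "None") listout

-- ===== PORT B =====
def pvDescribe (e : String × List Int × List Int) : String :=
  if e ≠ ("", [], []) then
    PySem.Int.toStr (e.2.2.length : Int) ++ " Bookmarks; " ++ PySem.Int.toStr (e.2.1.length : Int) ++ " Killstreaks."
  else
    "None"

def formatbookmarkdata_alt (filelist : List String) (bookmarkdata : List (String × List Int × List Int)) : List String :=
  let d := bookmarkdata.foldl (fun d e => d.insert e.1 e) (PySem.Dict.empty : PySem.Dict String (String × List Int × List Int))
  filelist.map (fun f => pvDescribe (d.getD f ("", [], [])))

-- ===== PRECONDITION & SPEC =====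
def Spec_formatbookmarkdata (filelist : List String) (bookmarkdata : List (String × List Int × List Int)) (out : List String) : Prop := out = formatbookmarkdata_alt filelist bookmarkdata
instance (filelist : List String) (bookmarkdata : List (String × List Int × List Int)) (out : List String) : Decidable (Spec_formatbookmarkdata filelist bookmarkdata out) := by unfold Spec_formatbookmarkdata; infer_instance

-- ===== CLAIM (what is proved, stated in full; the proofs are below) =====
def Claim_equal_formatbookmarkdata : Prop := ∀ (filelist : List String) (bookmarkdata : List (String × List Int × List Int)), Dom_formatbookmarkdata filelist bookmarkdata → Spec_formatbookmarkdata filelist bookmarkdata (formatbookmarkdata filelist bookmarkdata)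

-- ===== LEMMAS AND PROOFS =====

-- the "last entry whose key is f, else sentinel" value both programs compute
def lastMatch (f : String) (bm : List (String × List Int × List Int)) (cur : String × List Int × List Int) : String × List Int × List Int :=
  bm.foldl (fun cur e => if e.1 = f then e else cur) cur

-- length is preserved by any conditional-set fold
theorem len_fold_setif {α : Type} (c : Nat → Bool) (v : Nat → α) :
    ∀ (l : List Nat) (acc : List α),
      (l.foldl (fun o j => if c j then o.set j (v j) else o) acc).length = acc.length := by
  intro l
  induction l with
  | nil => intro acc; rfl
  | cons x xs ih =>
      intro acc
      simp only [List.foldl_cons]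
      rw [ih]
      split <;> simp

-- pointwise value of a conditional-set fold over range n
theorem getD_fold_setif {α : Type} (c : Nat → Bool) (v : Nat → α) (s : α) :
    ∀ (n : Nat) (acc : List α) (k : Nat),
      ((List.range n).foldl (fun o j => if c j then o.set j (v j) else o) acc).getD k s
        = if k < n ∧ k < acc.length ∧ c k then v k else acc.getD k s := by
  intro n
  induction n with
  | zero => intro acc k; simp
  | succ m ih =>
      intro acc k
      rw [List.range_succ, List.foldl_append]
      simp only [List.foldl_cons, List.foldl_nil]
      have hlen : ((List.range m).foldl (fun o j => if c j then o.set j (v j) else o) acc).length = acc.length :=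
        len_fold_setif c v _ acc
      by_cases hc : c m = true
      · rw [if_pos hc]
        by_cases hlt : m < acc.length
        · by_cases hkm : k = m
          · subst hkm
            rw [List.getD_eq_getElem?_getD, List.getElem?_set_self (by omega)]
            simp [hlt, hc]
          · rw [List.getD_eq_getElem?_getD, List.getElem?_set_ne (by omega),
                ← List.getD_eq_getElem?_getD, ih]
            have : (k < m + 1 ∧ k < acc.length ∧ c k = true) ↔ (k < m ∧ k < acc.length ∧ c k = true) := by
              constructor
              · rintro ⟨h1, h2, h3⟩; exact ⟨by omega, h2, h3⟩
              · rintro ⟨h1, h2, h3⟩; exact ⟨by omega, h2, h3⟩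
            rw [if_congr this rfl rfl]
        · rw [List.set_eq_of_length_le (by omega), ih]
          have : (k < m + 1 ∧ k < acc.length ∧ c k = true) ↔ (k < m ∧ k < acc.length ∧ c k = true) := by
            constructor
            · rintro ⟨h1, h2, h3⟩; exact ⟨by omega, h2, h3⟩
            · rintro ⟨h1, h2, h3⟩; exact ⟨by omega, h2, h3⟩
          rw [if_congr this rfl rfl]
      · rw [if_neg hc, ih]
        have : (k < m + 1 ∧ k < acc.length ∧ c k = true) ↔ (k < m ∧ k < acc.length ∧ c k = true) := by
          constructor
          · rintro ⟨h1, h2, h3⟩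
            refine ⟨?_, h2, h3⟩
            rcases Nat.lt_succ_iff_lt_or_eq.mp h1 with h | h
            · exact h
            · exact absurd (h ▸ h3) hc
          · rintro ⟨h1, h2, h3⟩; exact ⟨by omega, h2, h3⟩
        rw [if_congr this rfl rfl]

-- the whole assignbookmarkdata fold, pointwise at an in-range index
theorem assign_getD (files : List String) (bm : List (String × List Int × List Int))
    (k : Nat) (hk : k < files.length) (s : String × List Int × List Int) :
    ∀ (acc : List (String × List Int × List Int)), acc.length = files.length →
      (bm.foldl (fun assignedlogs i =>
          (List.range files.length).foldl (fun assignedlogs j =>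
            if i.1 == files.getD j "" then assignedlogs.set j i else assignedlogs) assignedlogs) acc).getD k s
        = lastMatch (files.getD k "") bm (acc.getD k s) := by
  induction bm with
  | nil => intro acc _; rfl
  | cons e es ih =>
      intro acc hacc
      simp only [List.foldl_cons, lastMatch]
      have hlen : ((List.range files.length).foldl (fun assignedlogs j =>
          if e.1 == files.getD j "" then assignedlogs.set j e else assignedlogs) acc).length = files.length := by
        rw [len_fold_setif (fun j => e.1 == files.getD j "") (fun _ => e) (List.range files.length) acc, hacc]
      rw [ih _ hlen]
      unfold lastMatch
      congr 1
      rw [getD_fold_setif (fun j => e.1 == files.getD j "") (fun _ => e) s files.length acc k]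
      rw [hacc]
      by_cases hm : e.1 = files.getD k ""
      · simp [hk, hm]
      · simp [hk]

-- the dict fold of B, pointwise
theorem dict_getD (f : String) (s : String × List Int × List Int) :
    ∀ (bm : List (String × List Int × List Int)) (d : PySem.Dict String (String × List Int × List Int)),
      (bm.foldl (fun d e => d.insert e.1 e) d).getD f s = lastMatch f bm (d.getD f s) := by
  intro bm
  induction bm with
  | nil => intro d; rfl
  | cons e es ih =>
      intro d
      simp only [List.foldl_cons, lastMatch]
      rw [ih]
      unfold lastMatch
      congr 1
      rw [PySem.Dict.getD_insert]
      by_cases hm : e.1 = f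
      · simp [hm]
      · simp [hm, Ne.symm hm]

-- unconditional-set specializations
theorem len_fold_set {α : Type} (v : Nat → α) (l : List Nat) (acc : List α) :
    (l.foldl (fun o j => o.set j (v j)) acc).length = acc.length := by
  have hf : (fun (o : List α) j => if (fun (_ : Nat) => true) j then o.set j (v j) else o)
      = fun o j => o.set j (v j) := by funext o j; simp
  rw [← hf]
  exact len_fold_setif (fun _ => true) v l acc

theorem getD_fold_set {α : Type} (v : Nat → α) (s : α) (n : Nat) (acc : List α) (k : Nat) :
    ((List.range n).foldl (fun o j => o.set j (v j)) acc).getD k s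
      = if k < n ∧ k < acc.length then v k else acc.getD k s := by
  have hf : (fun (o : List α) j => if (fun (_ : Nat) => true) j then o.set j (v j) else o)
      = fun o j => o.set j (v j) := by funext o j; simp
  rw [← hf, getD_fold_setif (fun _ => true) v s n acc k]
  simp

-- length of assignbookmarkdata
theorem assign_length (files : List String) (bm : List (String × List Int × List Int)) :
    (assignbookmarkdata files bm).length = files.length := by
  unfold assignbookmarkdata
  simp only
  have : ∀ (l : List (String × List Int × List Int)) (acc : List (String × List Int × List Int)),
      (l.foldl (fun assignedlogs i =>
        (List.range files.length).foldl (fun assignedlogs j =>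
          if i.1 == files.getD j "" then assignedlogs.set j i else assignedlogs) assignedlogs) acc).length
      = acc.length := by
    intro l
    induction l with
    | nil => intro acc; rfl
    | cons e es ih =>
        intro acc
        simp only [List.foldl_cons]
        rw [ih, len_fold_setif (fun j => e.1 == files.getD j "") (fun _ => e)]
  rw [this]
  simp

-- A's outer formatting loop, rewritten as an unconditional set of pvDescribe
theorem formatA_eq (fl : List String) (bm : List (String × List Int × List Int)) :
    formatbookmarkdata fl bm
      = (List.range (assignbookmarkdata fl bm).length).foldl
          (fun o i => o.set i (pvDescribe ((assignbookmarkdata fl bm).getD i ("", [], []))))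
          ((assignbookmarkdata fl bm).map (fun _ => "")) := by
  unfold formatbookmarkdata
  simp only
  congr 1
  funext o i
  unfold pvDescribe
  split <;> rfl

-- ===== VERDICT (by name: the statement is the Claim_ definition above) =====
theorem formatbookmarkdata_spec : Claim_equal_formatbookmarkdata := by
  intro fl bm _
  show formatbookmarkdata fl bm = formatbookmarkdata_alt fl bm
  have halen := assign_length fl bm
  have hAlen : (formatbookmarkdata fl bm).length = fl.length := by
    rw [formatA_eq, len_fold_set, List.length_map, halen]
  have hBlen : (formatbookmarkdata_alt fl bm).length = fl.length := by
    unfold formatbookmarkdata_alt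
    simp
  apply List.ext_getElem (by rw [hAlen, hBlen])
  intro k h1 h2
  have hk : k < fl.length := by rw [hAlen] at h1; exact h1
  -- A side
  have hA : (formatbookmarkdata fl bm)[k] = pvDescribe ((assignbookmarkdata fl bm).getD k ("", [], [])) := by
    rw [← List.getD_eq_getElem _ "" h1, formatA_eq, getD_fold_set]
    rw [if_pos ⟨by rw [halen]; exact hk, by rw [List.length_map, halen]; exact hk⟩]
  have hassign : (assignbookmarkdata fl bm).getD k ("", [], [])
      = lastMatch (fl.getD k "") bm ("", [], []) := by
    unfold assignbookmarkdata
    simp only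
    rw [assign_getD fl bm k hk ("", [], []) _ (by simp)]
    congr 1
    rw [List.getD_eq_getElem _ _ (by simp [hk])]
    simp
  -- B side
  have hB : (formatbookmarkdata_alt fl bm)[k] = pvDescribe (lastMatch fl[k] bm ("", [], [])) := by
    unfold formatbookmarkdata_alt
    simp only [List.getElem_map]
    rw [dict_getD, PySem.Dict.getD_empty]
  rw [hA, hassign, hB, List.getD_eq_getElem _ _ hk]
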